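-- pv_equiv track=rewrite | github.com/anudeepkantamaneni/anudeepkantamaneni | Circle of Words.py | circleOfWords
-- ===== SOURCE A (Python) =====
-- from collections import defaultdict
--
-- def circleOfWords(words):
--     graph = defaultdict(list)
--     in_deg = defaultdict(int)
--     out_deg = defaultdict(int)
--     letters = set()
--
--     for word in words:
--         start = word[0]
--         end = word[-1]
--         graph[start].append(end)
--         out_deg[start] += 1
--         in_deg[end] += 1
--         letters.update([start, end])
--
--     for ch in letters:
--         if in_deg[ch] != out_deg[ch]:
--             return False
--
--     # DFS to check connectivity
--     def dfs(node, visited):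
--         visited.add(node)
--         for neighbor in graph[node]:
--             if neighbor not in visited:
--                 dfs(neighbor, visited)
--
--     # Start from any letter that has an edge
--     start_node = next(iter(graph))
--     visited = set()
--     dfs(start_node, visited)
--
--     for ch in letters:
--         if ch not in visited:
--             return False
--
--     return True
-- ===== SOURCE B (Python) =====
-- def circleOfWords(words):
--     # Multiset check: the first letters must be a permutation of the last letters
--     # (equivalent to every letter having equal in- and out-degree).
--     firsts = [w[0] for w in words]
--     lasts = [w[-1] for w in words]
--     if sorted(firsts) != sorted(lasts):
--         return False
--     letters = set(firsts)
--     # Round-based saturation instead of DFS: grow the set of letters reachable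
--     # from the first word's first letter; len(letters) rounds suffice, since
--     # every round before the fixpoint adds at least one new letter.
--     visited = {firsts[0]}
--     for _ in range(len(letters)):
--         visited |= {b for a, b in zip(firsts, lasts) if a in visited}
--     return letters <= visited
-- ===== Notes on version B (the rewrite author's own statement) =====
-- stated objective: alternative
-- what changed: B drops the adjacency dict, per-letter degree dicts and recursive DFS: it compares the sorted multisets of first and last letters for the balance check and computes reachability by round-based saturation over the (first,last) pairs, with |letters| rounds replacing the recursion.
import Mathlib
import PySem

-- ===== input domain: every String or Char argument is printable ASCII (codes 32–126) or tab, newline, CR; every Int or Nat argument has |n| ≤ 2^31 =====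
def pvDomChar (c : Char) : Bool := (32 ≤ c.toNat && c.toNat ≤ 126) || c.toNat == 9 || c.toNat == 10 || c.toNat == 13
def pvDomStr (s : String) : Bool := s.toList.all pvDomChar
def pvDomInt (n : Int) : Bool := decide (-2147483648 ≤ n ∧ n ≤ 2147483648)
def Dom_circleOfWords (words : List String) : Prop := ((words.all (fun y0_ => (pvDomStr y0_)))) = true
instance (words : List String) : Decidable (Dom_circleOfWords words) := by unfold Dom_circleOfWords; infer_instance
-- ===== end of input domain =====

-- B replaces A's dict graph, degree dicts and recursive DFS by a sorted-multiset
-- balance check and round-based reachability saturation over (first,last) pairs.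

-- ===== PORT A =====

-- one iteration of A's build loop: word[0]/word[-1] (none = IndexError), then
-- graph[start].append(end); out_deg[start] += 1; in_deg[end] += 1; letters.update([start, end])
def pvStepA
    (st : PySem.Dict Char (List Char) × PySem.Dict Char Int × PySem.Dict Char Int × PySem.Set Char)
    (word : String) :
    Option (PySem.Dict Char (List Char) × PySem.Dict Char Int × PySem.Dict Char Int × PySem.Set Char) :=
  match PySem.Str.pyGet? word 0, PySem.Str.pyGet? word (-1) with
  | some s, some e =>
      some (st.1.modify s [] (fun l => l ++ [e]),
            st.2.1.modify e 0 (fun n => n + 1),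
            st.2.2.1.modify s 0 (fun n => n + 1),
            PySem.Set.update st.2.2.2 [s, e])
  | _, _ => none

-- A's recursive dfs; the fuel only makes the recursion structural (2*len(words)+1
-- strictly exceeds the number of distinct letters, so it is never exhausted)
def pvDfsA (g : PySem.Dict Char (List Char)) : Nat → Char → List Char → List Char
  | 0, _, visited => visited
  | f + 1, node, visited =>
      (g.getD node []).foldl
        (fun acc nb => if nb ∈ acc then acc else pvDfsA g f nb acc)
        (PySem.Set.add visited node)

def circleOfWords (words : List String) : Bool :=
  match words.foldl (fun ost w => ost.bind (fun st => pvStepA st w))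
      (some (PySem.Dict.empty, PySem.Dict.empty, PySem.Dict.empty, PySem.Set.empty)) with
  | none => false   -- some word was "": Python raises IndexError (outside Pre_)
  | some (graph, in_deg, out_deg, letters) =>
    if letters.any (fun ch => decide (in_deg.getD ch 0 ≠ out_deg.getD ch 0)) then false
    else
      match graph.keys with
      | [] => false   -- next(iter(graph)) raises StopIteration (words == [], outside Pre_)
      | startNode :: _ =>
        let visited := pvDfsA graph (2 * words.length + 1) startNode PySem.Set.empty
        !(letters.any (fun ch => decide (ch ∉ visited)))

-- ===== PORT B =====

def pvHeads? (words : List String) : Option (List Char) :=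
  words.mapM (fun w => PySem.Str.pyGet? w 0)

def pvLasts? (words : List String) : Option (List Char) :=
  words.mapM (fun w => PySem.Str.pyGet? w (-1))

-- one saturation round: visited |= {b for a, b in zip(firsts, lasts) if a in visited}
def pvRoundB (pairs : List (Char × Char)) (visited : PySem.Set Char) : PySem.Set Char :=
  pairs.foldl (fun acc p => if p.1 ∈ visited then PySem.Set.add acc p.2 else acc) visited

def circleOfWords_alt (words : List String) : Bool :=
  match pvHeads? words, pvLasts? words with
  | some firsts, some lasts =>
    if PySem.List.sorted firsts (fun c => c) ≠ PySem.List.sorted lasts (fun c => c) then false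
    else
      let letters := PySem.Set.ofList firsts
      match firsts with
      | [] => false   -- firsts[0] raises IndexError (words == [], outside Pre_)
      | h0 :: _ =>
        let visited := (List.range letters.length).foldl
          (fun vis _ => pvRoundB (firsts.zip lasts) vis) [h0]
        PySem.Set.issubset letters visited
  | _, _ => false    -- some word was "": IndexError (outside Pre_)

-- ===== PRECONDITION & SPEC =====

-- Pre_ excludes exactly the inputs on which A raises: the empty list
-- (StopIteration at next(iter(graph))) and lists containing an empty word
-- (IndexError at word[0]); B raises IndexError on both kinds of input as well.
def Pre_circleOfWords (words : List String) : Prop :=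
  words ≠ [] ∧ ∀ w ∈ words, w.toList ≠ []
instance (words : List String) : Decidable (Pre_circleOfWords words) := by
  unfold Pre_circleOfWords; infer_instance

def pvWitness_circleOfWords : List String := ["ab", "ba"]

def Spec_circleOfWords (words : List String) (out : Bool) : Prop := out = circleOfWords_alt words
instance (words : List String) (out : Bool) : Decidable (Spec_circleOfWords words out) := by
  unfold Spec_circleOfWords; infer_instance

-- ===== CLAIM (what is proved, stated in full; the proofs are below) =====
def Claim_equal_circleOfWords : Prop := ∀ (words : List String), Dom_circleOfWords words → Pre_circleOfWords words → Spec_circleOfWords words (circleOfWords words)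

-- ===== LEMMAS AND PROOFS =====

-- edge relation and reachability over the (first,last) pairs
def pvEdge (es : List (Char × Char)) (a b : Char) : Prop := (a, b) ∈ es
def pvReach (es : List (Char × Char)) : Char → Char → Prop := Relation.ReflTransGen (pvEdge es)

-- ---- extraction under Pre_ ----
theorem pvHeads0 (w : String) (h : w.toList ≠ []) : ∃ c, PySem.Str.pyGet? w 0 = some c := by
  simp only [PySem.Str.pyGet?, PySem.Chars.pyGet?, PySem.List.pyGet?_zero]
  cases hw : w.toList with
  | nil => exact absurd hw h
  | cons c t => exact ⟨c, rfl⟩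

theorem pvLast0 (w : String) (h : w.toList ≠ []) : ∃ c, PySem.Str.pyGet? w (-1) = some c := by
  simp only [PySem.Str.pyGet?, PySem.Chars.pyGet?, PySem.List.pyGet?_neg_one]
  exact Option.isSome_iff_exists.mp (List.getLast?_isSome.mpr h)

theorem pvHeads?_isSome (words : List String) (h : ∀ w ∈ words, w.toList ≠ []) :
    ∃ hs, pvHeads? words = some hs ∧ hs.length = words.length := by
  induction words with
  | nil => exact ⟨[], rfl, rfl⟩
  | cons w ws ih =>
    obtain ⟨hs, hhs, hlen⟩ := ih (fun x hx => h x (List.mem_cons_of_mem _ hx))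
    obtain ⟨c, hc⟩ := pvHeads0 w (h w (List.mem_cons_self))
    refine ⟨c :: hs, ?_, by simp [hlen]⟩
    simp only [pvHeads?, List.mapM_cons] at hhs ⊢
    rw [hc, hhs]
    rfl

theorem pvLasts?_isSome (words : List String) (h : ∀ w ∈ words, w.toList ≠ []) :
    ∃ ls, pvLasts? words = some ls ∧ ls.length = words.length := by
  induction words with
  | nil => exact ⟨[], rfl, rfl⟩
  | cons w ws ih =>
    obtain ⟨ls, hls, hlen⟩ := ih (fun x hx => h x (List.mem_cons_of_mem _ hx))
    obtain ⟨c, hc⟩ := pvLast0 w (h w (List.mem_cons_self))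
    refine ⟨c :: ls, ?_, by simp [hlen]⟩
    simp only [pvLasts?, List.mapM_cons] at hls ⊢
    rw [hc, hls]
    rfl

-- ---- A's build loop equals four independent folds over the zipped pairs ----
def pvBuildPairs (es : List (Char × Char))
    (st : PySem.Dict Char (List Char) × PySem.Dict Char Int × PySem.Dict Char Int × PySem.Set Char) :
    PySem.Dict Char (List Char) × PySem.Dict Char Int × PySem.Dict Char Int × PySem.Set Char :=
  es.foldl (fun st p =>
    (st.1.modify p.1 [] (fun l => l ++ [p.2]),
     st.2.1.modify p.2 0 (fun n => n + 1),
     st.2.2.1.modify p.1 0 (fun n => n + 1),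
     PySem.Set.update st.2.2.2 [p.1, p.2])) st
theorem pvBuildA_eq (words : List String) (hs ls : List Char)
    (hh : pvHeads? words = some hs) (hl : pvLasts? words = some ls) (st : PySem.Dict Char (List Char) × PySem.Dict Char Int × PySem.Dict Char Int × PySem.Set Char) :
    words.foldl (fun ost w => ost.bind (fun st => pvStepA st w)) (some st)
      = some (pvBuildPairs (hs.zip ls) st) := by
  induction words generalizing hs ls st with
  | nil =>
    simp only [pvHeads?, List.mapM_nil] at hh
    simp only [pvLasts?, List.mapM_nil] at hl
    cases hh; cases hl
    rfl
  | cons w ws ih =>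
    simp only [pvHeads?, List.mapM_cons] at hh
    simp only [pvLasts?, List.mapM_cons] at hl
    cases hc : PySem.Str.pyGet? w 0 with
    | none => rw [hc] at hh; exact absurd hh (by simp)
    | some c =>
      cases he : PySem.Str.pyGet? w (-1) with
      | none => rw [he] at hl; exact absurd hl (by simp)
      | some e =>
        rw [hc] at hh; rw [he] at hl
        cases hhs : List.mapM (fun w => PySem.Str.pyGet? w 0) ws with
        | none => rw [hhs] at hh; exact absurd hh (by simp)
        | some hs' =>
          cases hls : List.mapM (fun w => PySem.Str.pyGet? w (-1)) ws with
          | none => rw [hls] at hl; exact absurd hl (by simp)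
          | some ls' =>
            rw [hhs] at hh; rw [hls] at hl
            simp at hh hl
            cases hh; cases hl
            simp only [List.foldl_cons]
            have hstep : pvStepA st w = some
              (st.1.modify c [] (fun l => l ++ [e]),
               st.2.1.modify e 0 (fun n => n + 1),
               st.2.2.1.modify c 0 (fun n => n + 1),
               PySem.Set.update st.2.2.2 [c, e]) := by
              unfold pvStepA
              rw [hc, he]
            have hbind : (some st).bind (fun st => pvStepA st w) = pvStepA st w := rfl
            rw [hbind, hstep]
            rw [ih hs' ls' hhs hls]
            rfl

theorem pvBuildPairs_split (es : List (Char × Char)) (a : PySem.Dict Char (List Char))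
    (b c : PySem.Dict Char Int) (d : PySem.Set Char) :
    pvBuildPairs es (a, b, c, d) =
      (es.foldl (fun g p => g.modify p.1 [] (fun l => l ++ [p.2])) a,
       es.foldl (fun m p => m.modify p.2 0 (fun n => n + 1)) b,
       es.foldl (fun m p => m.modify p.1 0 (fun n => n + 1)) c,
       es.foldl (fun s p => PySem.Set.update s [p.1, p.2]) d) := by
  induction es generalizing a b c d with
  | nil => rfl
  | cons p t ih =>
    simp only [pvBuildPairs, List.foldl_cons] at *
    exact ih _ _ _ _

theorem pvLetters_mem (es : List (Char × Char)) (d : PySem.Set Char) (x : Char) :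
    x ∈ es.foldl (fun s p => PySem.Set.update s [p.1, p.2]) d ↔
      x ∈ d ∨ (x ∈ es.map Prod.fst ∨ x ∈ es.map Prod.snd) := by
  induction es generalizing d with
  | nil => simp
  | cons p t ih =>
    simp only [List.foldl_cons, ih, PySem.Set.mem_update, List.map_cons, List.mem_cons]
    constructor <;> intro h <;> (try tauto)

theorem pvGraph_mem (es : List (Char × Char)) (a b : Char) :
    b ∈ (es.foldl (fun g p => g.modify p.1 [] (fun l => l ++ [p.2])) PySem.Dict.empty).getD a []
      ↔ (a, b) ∈ es := by
  rw [PySem.Dict.getD_foldl_modify_append]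
  simp only [PySem.Dict.getD_empty, List.nil_append, List.mem_map, List.mem_filter]
  constructor
  · rintro ⟨p, ⟨hp, hpa⟩, hpb⟩
    have : p = (a, b) := by
      have := beq_iff_eq.mp hpa
      cases p; simp_all
    exact this ▸ hp
  · intro h
    exact ⟨(a, b), ⟨h, by simp⟩, rfl⟩

theorem pvGraph_keys (es : List (Char × Char)) :
    (es.foldl (fun g p => g.modify p.1 [] (fun l => l ++ [p.2])) PySem.Dict.empty).keys
      = PySem.Set.ofList (es.map Prod.fst) := by
  rw [PySem.Dict.keys_foldl_modify_key es Prod.fst [] (fun d x v => v ++ [x.2]) PySem.Dict.empty]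
  rw [show (PySem.Dict.empty : PySem.Dict Char (List Char)).keys = [] from rfl]
  exact PySem.Set.update_nil_left _


def pvGraphOf (es : List (Char × Char)) : PySem.Dict Char (List Char) :=
  es.foldl (fun g p => g.modify p.1 [] (fun l => l ++ [p.2])) PySem.Dict.empty
def pvInOf (es : List (Char × Char)) : PySem.Dict Char Int :=
  es.foldl (fun m p => m.modify p.2 0 (fun n => n + 1)) PySem.Dict.empty
def pvOutOf (es : List (Char × Char)) : PySem.Dict Char Int :=
  es.foldl (fun m p => m.modify p.1 0 (fun n => n + 1)) PySem.Dict.empty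
def pvLettersOf (es : List (Char × Char)) : PySem.Set Char :=
  es.foldl (fun s p => PySem.Set.update s [p.1, p.2]) PySem.Set.empty

theorem pvBuildPairs_eq (es : List (Char × Char)) :
    pvBuildPairs es (PySem.Dict.empty, PySem.Dict.empty, PySem.Dict.empty, PySem.Set.empty)
      = (pvGraphOf es, pvInOf es, pvOutOf es, pvLettersOf es) := by
  rw [pvBuildPairs_split]
  rfl

theorem pvSetAdd_prefix (v : List Char) (x : Char) : ∃ t, PySem.Set.add v x = v ++ t := by
  unfold PySem.Set.add
  split
  · exact ⟨[], by simp⟩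
  · exact ⟨[x], rfl⟩

theorem pvDfsA_sound (es : List (Char × Char)) (g : PySem.Dict Char (List Char))
    (hmem : ∀ a b, b ∈ g.getD a [] ↔ (a, b) ∈ es) :
    ∀ (f : Nat) (n : Char) (v : List Char) (x : Char),
      x ∈ pvDfsA g f n v → x ∈ v ∨ pvReach es n x := by
  intro f
  induction f with
  | zero => intro n v x hx; exact Or.inl (by simpa [pvDfsA] using hx)
  | succ f ih =>
    intro n v x hx
    have key : ∀ (l : List Char), (∀ nb ∈ l, (n, nb) ∈ es) →
        ∀ (acc : List Char), (∀ y ∈ acc, y ∈ v ∨ pvReach es n y) →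
        ∀ y ∈ l.foldl (fun acc nb => if nb ∈ acc then acc else pvDfsA g f nb acc) acc,
          y ∈ v ∨ pvReach es n y := by
      intro l
      induction l with
      | nil => intro _ acc hacc y hy; exact hacc y (by simpa using hy)
      | cons nb l' ihl =>
        intro hl acc hacc y hy
        simp only [List.foldl_cons] at hy
        by_cases hnb : nb ∈ acc
        · rw [if_pos hnb] at hy
          exact ihl (fun z hz => hl z (List.mem_cons_of_mem _ hz)) acc hacc y hy
        · rw [if_neg hnb] at hy
          refine ihl (fun z hz => hl z (List.mem_cons_of_mem _ hz)) _ ?_ y hy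
          intro z hz
          rcases ih nb acc z hz with hz' | hz'
          · exact hacc z hz'
          · exact Or.inr (Relation.ReflTransGen.head (hl nb List.mem_cons_self) hz')
    refine key (g.getD n []) (fun nb hnb => (hmem n nb).mp hnb) (PySem.Set.add v n) ?_ x hx
    intro y hy
    rcases (PySem.Set.mem_add v n y).mp hy with h | h
    · exact Or.inl h
    · exact Or.inr (h ▸ Relation.ReflTransGen.refl)

def pvStep (g : PySem.Dict Char (List Char)) (f : Nat) : List Char → Char → List Char :=
  fun acc nb => if nb ∈ acc then acc else pvDfsA g f nb acc

theorem pvDfsA_succ (g : PySem.Dict Char (List Char)) (f : Nat) (n : Char) (v : List Char) :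
    pvDfsA g (f + 1) n v = (g.getD n []).foldl (pvStep g f) (PySem.Set.add v n) := rfl

theorem pvSetAdd_not_mem (v : List Char) (x : Char) (h : x ∉ v) :
    PySem.Set.add v x = v ++ [x] := by
  unfold PySem.Set.add
  simp [h]

theorem pvNodupSnoc (v : List Char) (n : Char) (hnd : v.Nodup) (hnv : n ∉ v) :
    (v ++ [n]).Nodup := by
  have h : ∀ a ∈ v, ¬a = n := fun a ha h => hnv (h ▸ ha)
  simp only [List.nodup_append, hnd, true_and]
  exact ⟨List.nodup_singleton n, by simpa [List.disjoint_right] using h⟩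

theorem pvNodupSubsetCard (v : List Char) (U : Finset Char) (hnd : v.Nodup)
    (hsub : ∀ x ∈ v, x ∈ U) : v.length ≤ U.card := by
  have h1 : v.toFinset ⊆ U := fun x hx => hsub x (List.mem_toFinset.mp hx)
  have h2 : v.toFinset.card = v.length := List.toFinset_card_of_nodup hnd
  calc v.length = v.toFinset.card := h2.symm
    _ ≤ U.card := Finset.card_le_card h1

theorem pvDfsA_closed (es : List (Char × Char)) (g : PySem.Dict Char (List Char))
    (hmem : ∀ a b, b ∈ g.getD a [] ↔ (a, b) ∈ es) (U : Finset Char)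
    (hU : ∀ a b, (a, b) ∈ es → b ∈ U) :
    ∀ (f : Nat) (v : List Char) (n : Char), v.Nodup → (∀ x ∈ v, x ∈ U) → n ∈ U → n ∉ v →
      U.card - v.length ≤ f →
      n ∈ pvDfsA g f n v ∧ (∃ t, pvDfsA g f n v = v ++ t) ∧ (pvDfsA g f n v).Nodup ∧
        (∀ x ∈ pvDfsA g f n v, x ∈ U) ∧
        (∀ y ∈ pvDfsA g f n v, y ∉ v → ∀ b, (y, b) ∈ es → b ∈ pvDfsA g f n v) := by
  intro f
  induction f with
  | zero =>
    intro v n hnd hvU hnU hnv hfuel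
    exfalso
    have h1 : (v ++ [n]).length ≤ U.card := by
      refine pvNodupSubsetCard _ U (pvNodupSnoc v n hnd hnv) ?_
      intro x hx
      rcases List.mem_append.mp hx with h | h
      · exact hvU x h
      · simpa using (List.mem_singleton.mp h) ▸ hnU
    simp at h1
    omega
  | succ f ihf =>
    intro v n hnd hvU hnU hnv hfuel
    rw [pvDfsA_succ, pvSetAdd_not_mem v n hnv]
    -- the fold invariant
    have fold : ∀ (l : List Char), (∀ nb ∈ l, nb ∈ U) →
        ∀ (acc : List Char), acc.Nodup → (∀ x ∈ acc, x ∈ U) →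
        (∃ t, acc = (v ++ [n]) ++ t) →
        (∀ y ∈ acc, y ∉ v → y ≠ n → ∀ b, (y, b) ∈ es → b ∈ acc) →
        (∃ t2, l.foldl (pvStep g f) acc = acc ++ t2) ∧
          (l.foldl (pvStep g f) acc).Nodup ∧
          (∀ x ∈ l.foldl (pvStep g f) acc, x ∈ U) ∧
          (∀ y ∈ l.foldl (pvStep g f) acc, y ∉ v → y ≠ n →
            ∀ b, (y, b) ∈ es → b ∈ l.foldl (pvStep g f) acc) ∧
          (∀ nb ∈ l, nb ∈ l.foldl (pvStep g f) acc) := by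
      intro l
      induction l with
      | nil =>
        intro _ acc hacc haccU hpre hcl
        exact ⟨⟨[], by simp⟩, hacc, haccU, by simpa using hcl, by simp⟩
      | cons nb l' ihl =>
        intro hlU acc hacc haccU hpre hcl
        simp only [List.foldl_cons]
        by_cases hnb : nb ∈ acc
        · rw [show pvStep g f acc nb = acc from by simp [pvStep, hnb]]
          obtain ⟨hp, hn, hu, hc, hm⟩ :=
            ihl (fun z hz => hlU z (List.mem_cons_of_mem _ hz)) acc hacc haccU hpre hcl
          refine ⟨hp, hn, hu, hc, ?_⟩
          intro z hz
          rcases List.mem_cons.mp hz with rfl | hz'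
          · obtain ⟨t2, ht2⟩ := hp
            rw [ht2]; exact List.mem_append_left _ hnb
          · exact hm z hz'
        · rw [show pvStep g f acc nb = pvDfsA g f nb acc from by simp [pvStep, hnb]]
          obtain ⟨tp, htp⟩ := hpre
          have hfuel' : U.card - acc.length ≤ f := by
            have hl1 : acc.length = (v ++ [n]).length + tp.length := by
              rw [htp, List.length_append]
            have hl2 : (v ++ [n]).length = v.length + 1 := by simp
            omega
          obtain ⟨hnbin, ⟨t1, ht1⟩, hnd1, hU1, hcl1⟩ :=
            ihf acc nb hacc haccU (hlU nb List.mem_cons_self) hnb hfuel'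
          have hpre1 : ∃ t, pvDfsA g f nb acc = (v ++ [n]) ++ t := by
            exact ⟨tp ++ t1, by rw [ht1, htp, List.append_assoc]⟩
          have hcl' : ∀ y ∈ pvDfsA g f nb acc, y ∉ v → y ≠ n →
              ∀ b, (y, b) ∈ es → b ∈ pvDfsA g f nb acc := by
            intro y hy hyv hyn b hb
            by_cases hyacc : y ∈ acc
            · have := hcl y hyacc hyv hyn b hb
              rw [ht1]; exact List.mem_append_left _ this
            · exact hcl1 y hy hyacc b hb
          obtain ⟨⟨t2, ht2⟩, hn2, hu2, hc2, hm2⟩ :=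
            ihl (fun z hz => hlU z (List.mem_cons_of_mem _ hz)) (pvDfsA g f nb acc)
              hnd1 hU1 hpre1 hcl'
          refine ⟨⟨t1 ++ t2, by rw [ht2, ht1, List.append_assoc]⟩, hn2, hu2, hc2, ?_⟩
          intro z hz
          rcases List.mem_cons.mp hz with rfl | hz'
          · rw [ht2]; exact List.mem_append_left _ hnbin
          · exact hm2 z hz'
    have hnbU : ∀ nb ∈ g.getD n [], nb ∈ U := by
      intro nb hnb
      exact hU n nb ((hmem n nb).mp hnb)
    obtain ⟨⟨t2, ht2⟩, hn2, hu2, hc2, hm2⟩ := fold (g.getD n []) hnbU (v ++ [n])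
      (pvNodupSnoc v n hnd hnv)
      (by intro x hx
          rcases List.mem_append.mp hx with h | h
          · exact hvU x h
          · simpa using (List.mem_singleton.mp h) ▸ hnU)
      ⟨[], by simp⟩
      (by intro y hy hyv hyn b hb
          rcases List.mem_append.mp hy with h | h
          · exact absurd h hyv
          · exact absurd (List.mem_singleton.mp h) hyn)
    have hnin : n ∈ (g.getD n []).foldl (pvStep g f) (v ++ [n]) := by
      rw [ht2]; exact List.mem_append_left _ (by simp)
    refine ⟨hnin, ⟨[n] ++ t2, by rw [ht2, List.append_assoc]⟩, hn2, hu2, ?_⟩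
    intro y hy hyv b hb
    by_cases hyn : y = n
    · subst hyn
      exact hm2 b ((hmem y b).mpr hb)
    · exact hc2 y hy hyv hyn b hb

theorem pvDfsA_char (es : List (Char × Char)) (g : PySem.Dict Char (List Char))
    (hmem : ∀ a b, b ∈ g.getD a [] ↔ (a, b) ∈ es) (U : Finset Char)
    (hU : ∀ a b, (a, b) ∈ es → b ∈ U) (h0 : Char) (hh0 : h0 ∈ U) (f : Nat)
    (hf : U.card ≤ f) (x : Char) :
    x ∈ pvDfsA g f h0 [] ↔ pvReach es h0 x := by
  obtain ⟨hin, _, _, _, hcl⟩ := pvDfsA_closed es g hmem U hU f [] h0 List.nodup_nil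
    (by simp) hh0 (by simp) (by simpa using hf)
  constructor
  · intro hx
    rcases pvDfsA_sound es g hmem f h0 [] x hx with h | h
    · simp at h
    · exact h
  · intro hr
    induction hr with
    | refl => exact hin
    | tail hab hbc ih => exact hcl _ ih (by simp) _ hbc

theorem pvRoundB_mem (ps : List (Char × Char)) (vis : PySem.Set Char) (x : Char) :
    x ∈ pvRoundB ps vis ↔ x ∈ vis ∨ ∃ p ∈ ps, p.1 ∈ vis ∧ p.2 = x := by
  unfold pvRoundB
  have key : ∀ (l : List (Char × Char)) (acc : List Char),
      x ∈ l.foldl (fun acc p => if p.1 ∈ vis then PySem.Set.add acc p.2 else acc) acc ↔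
        x ∈ acc ∨ ∃ p ∈ l, p.1 ∈ vis ∧ p.2 = x := by
    intro l
    induction l with
    | nil => simp
    | cons p t ih =>
      intro acc
      simp only [List.foldl_cons]
      by_cases hp : p.1 ∈ vis
      · rw [if_pos hp, ih, PySem.Set.mem_add]
        constructor
        · rintro (⟨h | h⟩ | ⟨q, hq, h1, h2⟩)
          · exact Or.inl h
          · exact Or.inr ⟨p, List.mem_cons_self, hp, h.symm⟩
          · exact Or.inr ⟨q, List.mem_cons_of_mem _ hq, h1, h2⟩
        · rintro (h | ⟨q, hq, h1, h2⟩)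
          · exact Or.inl (Or.inl h)
          · rcases List.mem_cons.mp hq with rfl | hq'
            · exact Or.inl (Or.inr h2.symm)
            · exact Or.inr ⟨q, hq', h1, h2⟩
      · rw [if_neg hp, ih]
        constructor
        · rintro (h | ⟨q, hq, h1, h2⟩)
          · exact Or.inl h
          · exact Or.inr ⟨q, List.mem_cons_of_mem _ hq, h1, h2⟩
        · rintro (h | ⟨q, hq, h1, h2⟩)
          · exact Or.inl h
          · rcases List.mem_cons.mp hq with rfl | hq'
            · exact absurd h1 hp
            · exact Or.inr ⟨q, hq', h1, h2⟩
  exact key ps vis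

theorem pvRoundB_prefix (ps : List (Char × Char)) (vis : PySem.Set Char) :
    ∃ t, pvRoundB ps vis = vis ++ t := by
  unfold pvRoundB
  have key : ∀ (l : List (Char × Char)) (acc : List Char),
      ∃ t, l.foldl (fun acc p => if p.1 ∈ vis then PySem.Set.add acc p.2 else acc) acc
        = acc ++ t := by
    intro l
    induction l with
    | nil => exact fun acc => ⟨[], by simp⟩
    | cons p t ih =>
      intro acc
      simp only [List.foldl_cons]
      by_cases hp : p.1 ∈ vis
      · rw [if_pos hp]
        obtain ⟨t1, ht1⟩ := pvSetAdd_prefix acc p.2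
        obtain ⟨t2, ht2⟩ := ih (PySem.Set.add acc p.2)
        exact ⟨t1 ++ t2, by rw [ht2, ht1, List.append_assoc]⟩
      · rw [if_neg hp]; exact ih acc
  exact key ps vis

theorem pvRoundB_nodup (ps : List (Char × Char)) (vis : PySem.Set Char) (h : vis.Nodup) :
    (pvRoundB ps vis).Nodup := by
  unfold pvRoundB
  have key : ∀ (l : List (Char × Char)) (acc : List Char), acc.Nodup →
      (l.foldl (fun acc p => if p.1 ∈ vis then PySem.Set.add acc p.2 else acc) acc).Nodup := by
    intro l
    induction l with
    | nil => exact fun _ h => h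
    | cons p t ih =>
      intro acc hacc
      simp only [List.foldl_cons]
      by_cases hp : p.1 ∈ vis
      · rw [if_pos hp]; exact ih _ (PySem.Set.nodup_add acc p.2 hacc)
      · rw [if_neg hp]; exact ih acc hacc
  exact key ps vis h

theorem pvIterB_char (es : List (Char × Char)) (letters : List Char) (h0 : Char)
    (hnd : letters.Nodup) (hh0 : h0 ∈ letters)
    (hcl : ∀ a b, (a, b) ∈ es → b ∈ letters) (x : Char) :
    x ∈ (List.range letters.length).foldl (fun vis _ => pvRoundB es vis) [h0]
      ↔ pvReach es h0 x := by
  -- the loop is a function iterate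
  have hiter : ∀ (k : Nat) (a : PySem.Set Char),
      (List.range k).foldl (fun vis _ => pvRoundB es vis) a = (pvRoundB es)^[k] a := by
    intro k
    induction k with
    | zero => intro a; rfl
    | succ k ih =>
      intro a
      rw [List.range_succ, List.foldl_append, ih, Function.iterate_succ_apply']
      rfl
  rw [hiter]
  -- soundness
  have hsound : ∀ (k : Nat) (y : Char), y ∈ (pvRoundB es)^[k] [h0] → pvReach es h0 y := by
    intro k
    induction k with
    | zero => intro y hy; simp at hy; exact hy ▸ Relation.ReflTransGen.refl
    | succ k ih =>
      intro y hy
      rw [Function.iterate_succ_apply', pvRoundB_mem] at hy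
      rcases hy with h | ⟨p, hp, h1, h2⟩
      · exact ih y h
      · exact Relation.ReflTransGen.tail (ih p.1 h1) (h2 ▸ (show pvEdge es p.1 p.2 from hp))
  -- all iterates stay inside letters and are nodup
  have hsub : ∀ (k : Nat) (y : Char), y ∈ (pvRoundB es)^[k] [h0] → y ∈ letters := by
    intro k
    induction k with
    | zero => intro y hy; simp at hy; exact hy ▸ hh0
    | succ k ih =>
      intro y hy
      rw [Function.iterate_succ_apply', pvRoundB_mem] at hy
      rcases hy with h | ⟨p, hp, _, h2⟩
      · exact ih y h
      · exact h2 ▸ hcl p.1 p.2 hp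
  have hndk : ∀ (k : Nat), ((pvRoundB es)^[k] [h0]).Nodup := by
    intro k
    induction k with
    | zero => simp
    | succ k ih => rw [Function.iterate_succ_apply']; exact pvRoundB_nodup _ _ ih
  have hmono : ∀ (k : Nat), h0 ∈ (pvRoundB es)^[k] [h0] := by
    intro k
    induction k with
    | zero => simp
    | succ k ih =>
      rw [Function.iterate_succ_apply', pvRoundB_mem]
      exact Or.inl ih
  -- pigeonhole: within letters.length rounds a fixpoint is reached
  have hcard : ∀ (k : Nat), ((pvRoundB es)^[k] [h0]).length ≤ letters.length := by
    intro k
    have h1 : ((pvRoundB es)^[k] [h0]).toFinset ⊆ letters.toFinset := by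
      intro y hy
      exact List.mem_toFinset.mpr (hsub k y (List.mem_toFinset.mp hy))
    have h2 := Finset.card_le_card h1
    rw [List.toFinset_card_of_nodup (hndk k), List.toFinset_card_of_nodup hnd] at h2
    exact h2
  have hgrow : ∀ (k : Nat),
      (pvRoundB es)^[k + 1] [h0] = (pvRoundB es)^[k] [h0] ∨
        k + 1 ≤ ((pvRoundB es)^[k] [h0]).length := by
    intro k
    induction k with
    | zero => right; simp
    | succ k ih =>
      rcases ih with h | h
      · left
        have h1 : (pvRoundB es)^[k + 1 + 1] [h0] = pvRoundB es ((pvRoundB es)^[k + 1] [h0]) :=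
          Function.iterate_succ_apply' _ _ _
        have h2 : (pvRoundB es)^[k + 1] [h0] = pvRoundB es ((pvRoundB es)^[k] [h0]) :=
          Function.iterate_succ_apply' _ _ _
        rw [h1, h]
        exact h2.symm.trans h
      · by_cases heq : (pvRoundB es)^[k + 1] [h0] = (pvRoundB es)^[k] [h0]
        · left
          have h1 : (pvRoundB es)^[k + 1 + 1] [h0] = pvRoundB es ((pvRoundB es)^[k + 1] [h0]) :=
            Function.iterate_succ_apply' _ _ _
          have h2 : (pvRoundB es)^[k + 1] [h0] = pvRoundB es ((pvRoundB es)^[k] [h0]) :=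
            Function.iterate_succ_apply' _ _ _
          rw [h1, heq]
          exact h2.symm.trans heq
        · right
          have hstep : (pvRoundB es)^[k + 1] [h0] = pvRoundB es ((pvRoundB es)^[k] [h0]) :=
            Function.iterate_succ_apply' _ _ _
          obtain ⟨t, ht⟩ := pvRoundB_prefix es ((pvRoundB es)^[k] [h0])
          cases t with
          | nil => exact absurd (by rw [hstep, ht]; simp) heq
          | cons c t' =>
            rw [hstep, ht]
            simp only [List.length_append, List.length_cons]
            omega
  have hfix : pvRoundB es ((pvRoundB es)^[letters.length] [h0])
      = (pvRoundB es)^[letters.length] [h0] := by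
    rcases hgrow letters.length with h | h
    · have h2 : (pvRoundB es)^[letters.length + 1] [h0]
          = pvRoundB es ((pvRoundB es)^[letters.length] [h0]) :=
        Function.iterate_succ_apply' _ _ _
      exact h2.symm.trans h
    · exact absurd (hcard letters.length) (by omega)
  constructor
  · exact hsound letters.length x
  · intro hr
    induction hr with
    | refl => exact hmono letters.length
    | tail hab hbc ih =>
      rw [← hfix, pvRoundB_mem]
      exact Or.inr ⟨_, hbc, ih, rfl⟩

-- ---- glue: first key of A's dict, final assembly ----
theorem pvFoldlAdd_prefix (xs : List Char) :
    ∀ (s : List Char), ∃ t, List.foldl PySem.Set.add s xs = s ++ t := by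
  induction xs with
  | nil => exact fun s => ⟨[], by simp⟩
  | cons x xs ih =>
    intro s
    obtain ⟨t1, ht1⟩ := pvSetAdd_prefix s x
    obtain ⟨t2, ht2⟩ := ih (PySem.Set.add s x)
    exact ⟨t1 ++ t2, by rw [List.foldl_cons, ht2, ht1, List.append_assoc]⟩

theorem pvOfList_cons (x : Char) (xs : List Char) :
    ∃ t, PySem.Set.ofList (x :: xs) = x :: t := by
  obtain ⟨t, ht⟩ := pvFoldlAdd_prefix xs [x]
  refine ⟨t, ?_⟩
  rw [show PySem.Set.ofList (x :: xs) = List.foldl PySem.Set.add [x] xs from rfl, ht]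
  rfl

theorem pvCountFold (es : List (Char × Char)) (sel : Char × Char → Char)
    (d : PySem.Dict Char Int) :
    es.foldl (fun m p => m.modify (sel p) 0 (fun n => n + 1)) d
      = (es.map sel).foldl (fun m x => m.modify x 0 (fun n => n + 1)) d := by
  induction es generalizing d with
  | nil => rfl
  | cons p t ih => simp only [List.foldl_cons, List.map_cons, ih]

theorem pvMain (words : List String) (h0 : Char) (hs' ls : List Char)
    (hh : pvHeads? words = some (h0 :: hs')) (hl : pvLasts? words = some ls)
    (hlenh : (h0 :: hs').length = words.length) (hlenl : ls.length = words.length) :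
    circleOfWords words = circleOfWords_alt words := by
  set es := (h0 :: hs').zip ls with hes
  have hfst : es.map Prod.fst = h0 :: hs' := List.map_fst_zip (by omega)
  have hsnd : es.map Prod.snd = ls := List.map_snd_zip (by omega)
  -- reduce port A past its build loop
  have hA : circleOfWords words =
      (if (pvLettersOf es).any
            (fun ch => decide ((pvInOf es).getD ch 0 ≠ (pvOutOf es).getD ch 0)) then false
       else match (pvGraphOf es).keys with
         | [] => false
         | startNode :: _ =>
           !((pvLettersOf es).any (fun ch => decide (ch ∉
             pvDfsA (pvGraphOf es) (2 * words.length + 1) startNode PySem.Set.empty)))) := by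
    unfold circleOfWords
    rw [pvBuildA_eq words _ _ hh hl, pvBuildPairs_eq]
  -- reduce port B past its extraction
  have hB : circleOfWords_alt words =
      (if PySem.List.sorted (h0 :: hs') (fun c => c) ≠ PySem.List.sorted ls (fun c => c)
       then false
       else PySem.Set.issubset (PySem.Set.ofList (h0 :: hs'))
         ((List.range (PySem.Set.ofList (h0 :: hs')).length).foldl
           (fun vis _ => pvRoundB es vis) [h0])) := by
    unfold circleOfWords_alt
    rw [hh, hl]
  -- degree balance on both sides is multiset equality of firsts and lasts
  have hin : ∀ ch, (pvInOf es).getD ch 0 = (ls.count ch : Int) := by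
    intro ch
    unfold pvInOf
    rw [pvCountFold es Prod.snd, hsnd,
      PySem.Dict.getD_foldl_modify_add_one, PySem.Dict.getD_empty]
    simp [List.count]
  have hout : ∀ ch, (pvOutOf es).getD ch 0 = ((h0 :: hs').count ch : Int) := by
    intro ch
    unfold pvOutOf
    rw [pvCountFold es Prod.fst, hfst,
      PySem.Dict.getD_foldl_modify_add_one, PySem.Dict.getD_empty]
    simp [List.count]
  have hlet : ∀ x, x ∈ pvLettersOf es ↔ x ∈ (h0 :: hs') ∨ x ∈ ls := by
    intro x
    unfold pvLettersOf
    rw [pvLetters_mem, hfst, hsnd]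
    simp [PySem.Set.empty]
  have hbal : ((pvLettersOf es).any
      (fun ch => decide ((pvInOf es).getD ch 0 ≠ (pvOutOf es).getD ch 0)) = false)
      ↔ (h0 :: hs').Perm ls := by
    simp only [List.any_eq_false, decide_eq_true_eq, not_not]
    constructor
    · intro h
      rw [List.perm_iff_count]
      intro a
      by_cases ha : a ∈ (h0 :: hs') ∨ a ∈ ls
      · have h2 := h a ((hlet a).mpr ha)
        rw [hin, hout] at h2
        exact_mod_cast h2.symm
      · push Not at ha
        rw [List.count_eq_zero_of_not_mem ha.1, List.count_eq_zero_of_not_mem ha.2]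
    · intro hp ch _
      rw [hin, hout]
      have h2 := List.perm_iff_count.mp hp ch
      exact_mod_cast h2.symm
  by_cases hperm : (h0 :: hs').Perm ls
  · -- balanced: both sides run the reachability check from h0
    have hA2 : ¬(((pvLettersOf es).any
        (fun ch => decide ((pvInOf es).getD ch 0 ≠ (pvOutOf es).getD ch 0))) = true) := by
      rw [hbal.mpr hperm]
      simp
    have hseq : PySem.List.sorted (h0 :: hs') (fun c => c)
        = PySem.List.sorted ls (fun c => c) :=
      (PySem.List.sorted_id_eq_sorted_id_iff_perm _ _).mpr hperm
    have hkeys : (pvGraphOf es).keys = PySem.Set.ofList (h0 :: hs') := by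
      unfold pvGraphOf
      rw [pvGraph_keys es, hfst]
    obtain ⟨t0, ht0⟩ := pvOfList_cons h0 hs'
    rw [hA, hB, if_neg hA2, if_neg (fun hcon => hcon hseq), hkeys, ht0]
    -- reachability characterizations
    have hmemg : ∀ a b, b ∈ (pvGraphOf es).getD a [] ↔ (a, b) ∈ es :=
      fun a b => pvGraph_mem es a b
    have hU : ∀ a b, (a, b) ∈ es → b ∈ ((h0 :: hs') ++ ls).toFinset := by
      intro a b hab
      exact List.mem_toFinset.mpr (List.mem_append_right _ (List.of_mem_zip hab).2)
    have hh0U : h0 ∈ ((h0 :: hs') ++ ls).toFinset :=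
      List.mem_toFinset.mpr (List.mem_append_left _ List.mem_cons_self)
    have hfuel : ((h0 :: hs') ++ ls).toFinset.card ≤ 2 * words.length + 1 := by
      have h1 := List.toFinset_card_le ((h0 :: hs') ++ ls)
      rw [List.length_append] at h1
      omega
    have hvA : ∀ x, x ∈ pvDfsA (pvGraphOf es) (2 * words.length + 1) h0 PySem.Set.empty
        ↔ pvReach es h0 x := fun x =>
      pvDfsA_char es (pvGraphOf es) hmemg _ hU h0 hh0U (2 * words.length + 1) hfuel x
    have hmemS : ∀ x, x ∈ (h0 :: t0) ↔ x ∈ (h0 :: hs') := by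
      intro x
      rw [← ht0]
      exact PySem.Set.mem_ofList _ _
    have hndS : (h0 :: t0).Nodup := ht0 ▸ PySem.Set.nodup_ofList (h0 :: hs')
    have hclB : ∀ a b, (a, b) ∈ es → b ∈ (h0 :: t0) := by
      intro a b hab
      exact (hmemS b).mpr (hperm.mem_iff.mpr (List.of_mem_zip hab).2)
    have hvB : ∀ x, x ∈ (List.range (h0 :: t0).length).foldl
        (fun vis _ => pvRoundB es vis) [h0] ↔ pvReach es h0 x := fun x =>
      pvIterB_char es (h0 :: t0) h0 hndS List.mem_cons_self hclB x
    rw [Bool.eq_iff_iff]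
    simp only [Bool.not_eq_eq_eq_not, Bool.not_true, List.any_eq_false,
      decide_eq_true_eq, not_not, PySem.Set.issubset_iff]
    constructor
    · intro h x hx
      have hxh : x ∈ (h0 :: hs') := (hmemS x).mp hx
      have hxl : x ∈ pvLettersOf es := (hlet x).mpr (Or.inl hxh)
      exact (hvB x).mpr ((hvA x).mp (h x hxl))
    · intro h ch hch
      have hch2 : ch ∈ (h0 :: hs') := by
        rcases (hlet ch).mp hch with h1 | h1
        · exact h1
        · exact hperm.mem_iff.mpr h1
      exact (hvA ch).mpr ((hvB ch).mp (h ch ((hmemS ch).mpr hch2)))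
  · -- unbalanced: both sides return false
    have hA2 : ((pvLettersOf es).any
        (fun ch => decide ((pvInOf es).getD ch 0 ≠ (pvOutOf es).getD ch 0))) = true := by
      cases hx : ((pvLettersOf es).any
          (fun ch => decide ((pvInOf es).getD ch 0 ≠ (pvOutOf es).getD ch 0))) with
      | false => exact absurd (hbal.mp hx) hperm
      | true => rfl
    have hsne : PySem.List.sorted (h0 :: hs') (fun c => c)
        ≠ PySem.List.sorted ls (fun c => c) := by
      intro hcon
      exact hperm ((PySem.List.sorted_id_eq_sorted_id_iff_perm _ _).mp hcon)
    rw [hA, hB, if_pos hA2, if_pos hsne]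

-- ===== VERDICT (by name: the statement is the Claim_ definition above) =====
theorem circleOfWords_spec : Claim_equal_circleOfWords := by
  intro words _ hpre
  obtain ⟨hne, hwords⟩ := hpre
  obtain ⟨hs, hh, hlenh⟩ := pvHeads?_isSome words hwords
  obtain ⟨ls, hl, hlenl⟩ := pvLasts?_isSome words hwords
  unfold Spec_circleOfWords
  cases hs with
  | nil =>
    exfalso
    exact hne (List.length_eq_zero_iff.mp (by simpa using hlenh.symm))
  | cons h0 hs' => exact pvMain words h0 hs' ls hh hl hlenh hlenl
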